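-- pv_equiv track=rewrite | github.com/figelwump/fin-agent | fin_cli/fin_extract/parsers/pdf_loader.py | _looks_like_transaction_header
-- ===== SOURCE A (Python) =====
-- def _looks_like_transaction_header(headers: tuple[str, ...]) -> bool:
--     """Heuristic to detect whether a table header likely represents transactions."""
--
--     normalized = [header.lower() for header in headers]
--     has_date = any("date" in cell for cell in normalized)
--     has_amount = any(
--         any(keyword in cell for keyword in ("amount", "debit", "credit")) for cell in normalized
--     )
--     has_description = any("description" in cell or "merchant" in cell for cell in normalized)
--     return has_date and has_description and has_amount
-- ===== SOURCE B (Python) =====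
-- def _looks_like_transaction_header(headers: tuple[str, ...]) -> bool:
--     """Single fused pass: one loop over headers maintaining three feature flags,
--     breaking early once all three are set."""
--     has_date = has_amount = has_description = False
--     for header in headers:
--         cell = header.lower()
--         has_date = has_date or "date" in cell
--         has_amount = has_amount or "amount" in cell or "debit" in cell or "credit" in cell
--         has_description = has_description or "description" in cell or "merchant" in cell
--         if has_date and has_amount and has_description:
--             return True
--     return has_date and has_amount and has_description
-- ===== Notes on version B (the rewrite author's own statement) =====
-- stated objective: faster
-- what changed: Replaced the intermediate normalized list plus three independent any()-scans by a single fused pass that lowercases each header inline, maintains three boolean feature flags, and returns early once all three hold.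
import Mathlib
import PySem

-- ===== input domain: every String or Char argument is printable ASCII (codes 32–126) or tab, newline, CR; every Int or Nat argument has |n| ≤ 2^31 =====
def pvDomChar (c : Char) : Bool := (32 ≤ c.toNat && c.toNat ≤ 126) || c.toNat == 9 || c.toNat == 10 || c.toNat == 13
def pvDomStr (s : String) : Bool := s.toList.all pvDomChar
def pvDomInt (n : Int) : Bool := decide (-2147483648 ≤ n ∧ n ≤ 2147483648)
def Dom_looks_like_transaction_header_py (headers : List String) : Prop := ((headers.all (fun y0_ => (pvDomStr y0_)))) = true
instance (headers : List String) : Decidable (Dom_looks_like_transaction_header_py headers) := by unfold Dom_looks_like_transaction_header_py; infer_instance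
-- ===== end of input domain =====

-- B fuses A's normalized-list build plus three any() scans into one early-exit loop over raw headers (objective: alternative).

-- ===== PORT A =====
def looks_like_transaction_header_py (headers : List String) : Bool :=
  let normalized := headers.map PySem.Str.lower
  let has_date := normalized.any (fun cell => PySem.Str.isIn "date" cell)
  let has_amount := normalized.any (fun cell =>
    ["amount", "debit", "credit"].any (fun keyword => PySem.Str.isIn keyword cell))
  let has_description := normalized.any (fun cell =>
    PySem.Str.isIn "description" cell || PySem.Str.isIn "merchant" cell)
  has_date && has_description && has_amount

-- ===== PORT B =====
def pvAltLoop : List String → Bool → Bool → Bool → Bool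
  | [], has_date, has_amount, has_description => has_date && has_amount && has_description
  | header :: rest, has_date, has_amount, has_description =>
    let cell := PySem.Str.lower header
    let has_date := has_date || PySem.Str.isIn "date" cell
    let has_amount := has_amount || PySem.Str.isIn "amount" cell
      || PySem.Str.isIn "debit" cell || PySem.Str.isIn "credit" cell
    let has_description := has_description || PySem.Str.isIn "description" cell
      || PySem.Str.isIn "merchant" cell
    if has_date && has_amount && has_description then true
    else pvAltLoop rest has_date has_amount has_description

def looks_like_transaction_header_py_alt (headers : List String) : Bool :=
  pvAltLoop headers false false false

-- ===== PRECONDITION & SPEC =====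
def Spec_looks_like_transaction_header_py (headers : List String) (out : Bool) : Prop := out = looks_like_transaction_header_py_alt headers
instance (headers : List String) (out : Bool) : Decidable (Spec_looks_like_transaction_header_py headers out) := by unfold Spec_looks_like_transaction_header_py; infer_instance

-- ===== CLAIM (what is proved, stated in full; the proofs are below) =====
def Claim_equal_looks_like_transaction_header_py : Prop := ∀ (headers : List String), Dom_looks_like_transaction_header_py headers → Spec_looks_like_transaction_header_py headers (looks_like_transaction_header_py headers)

-- ===== LEMMAS AND PROOFS =====

theorem pvAltLoop_eq (l : List String) (d a de : Bool) :
    pvAltLoop l d a de =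
      ((d || l.any (fun h => PySem.Str.isIn "date" (PySem.Str.lower h))) &&
       (a || l.any (fun h => PySem.Str.isIn "amount" (PySem.Str.lower h)
          || PySem.Str.isIn "debit" (PySem.Str.lower h) || PySem.Str.isIn "credit" (PySem.Str.lower h))) &&
       (de || l.any (fun h => PySem.Str.isIn "description" (PySem.Str.lower h)
          || PySem.Str.isIn "merchant" (PySem.Str.lower h)))) := by
  induction l generalizing d a de with
  | nil => simp [pvAltLoop]
  | cons h t ih =>
    simp only [pvAltLoop, List.any_cons]
    split
    · rename_i hc
      simp only [Bool.and_eq_true] at hc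
      obtain ⟨⟨h1, h2⟩, h3⟩ := hc
      simp only [← Bool.or_assoc]
      rw [h1, h2, h3]
      simp
    · rw [ih]
      ac_rfl

-- ===== VERDICT (by name: the statement is the Claim_ definition above) =====
theorem looks_like_transaction_header_py_spec : Claim_equal_looks_like_transaction_header_py := by
  intro headers _
  unfold Spec_looks_like_transaction_header_py looks_like_transaction_header_py looks_like_transaction_header_py_alt
  rw [pvAltLoop_eq]
  simp [List.any_map, List.any_cons, Function.comp_def]
  ac_rfl
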